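-- pv_equiv track=rewrite | github.com/thomaswsu/Othello | othello.py | list_check
-- ===== SOURCE A (Python) =====
-- def opposite_of(color): # return opposite color
--     if color == 'r':
--         return 'b'
--     if color == 'b':
--         return 'r'
--     return -1
--
-- def list_check(lst,color):
-- 	if lst == []:
-- 		return True
-- 	if lst[0] == opposite_of(color):
-- 		return list_check(lst[1:],color)
-- 	if lst[0] == color:
-- 		return True
-- 	else:
-- 		return False
-- ===== SOURCE B (Python) =====
-- def list_check(lst, color):
--     # opposite color; None for any other color (A's opposite_of returns -1,
--     # which never equals a string element, so None behaves identically here)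
--     if color == 'r':
--         opp = 'b'
--     elif color == 'b':
--         opp = 'r'
--     else:
--         opp = None
--     for x in lst:
--         if x != opp:
--             return x == color
--     return True
-- ===== Notes on version B (the rewrite author's own statement) =====
-- stated objective: simpler
-- what changed: Replaces the recursive calls on copied slices lst[1:] with one iterative linear scan that skips opposite-colored elements and decides on the first other element.
import Mathlib
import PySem

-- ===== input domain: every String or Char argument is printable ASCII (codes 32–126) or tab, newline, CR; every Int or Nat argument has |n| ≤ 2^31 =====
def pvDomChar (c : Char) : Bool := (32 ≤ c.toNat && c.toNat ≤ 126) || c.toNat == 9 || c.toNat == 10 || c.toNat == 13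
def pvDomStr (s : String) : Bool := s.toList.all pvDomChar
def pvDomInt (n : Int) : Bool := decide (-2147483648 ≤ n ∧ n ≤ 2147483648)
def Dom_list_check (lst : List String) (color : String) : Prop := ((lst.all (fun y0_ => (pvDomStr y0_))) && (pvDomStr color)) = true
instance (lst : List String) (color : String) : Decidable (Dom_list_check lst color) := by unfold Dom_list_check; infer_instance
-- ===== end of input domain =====

-- B replaces A's recursion on the copied slice lst[1:] with a single iterative linear scan (objective: simpler).

-- ===== PORT A =====
-- opposite_of returns -1 (an int) for any color other than 'r'/'b'; an int never equals
-- a string element, so we model that return value as `none` and compare `some element`.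
def opposite_of (color : String) : Option String :=
  if color = "r" then some "b"
  else if color = "b" then some "r"
  else none

def list_check (lst : List String) (color : String) : Bool :=
  match lst with
  | [] => true
  | h :: t =>                 -- lst[0] = h, lst[1:] = t
    if some h = opposite_of color then list_check t color
    else if h = color then true
    else false

-- ===== PORT B =====
-- the for-loop of Source B: first element ≠ opp decides; exhausted list → true
def list_check_loop (lst : List String) (opp : Option String) (color : String) : Bool :=
  match lst with
  | [] => true
  | x :: t => if some x ≠ opp then x == color else list_check_loop t opp color

def list_check_alt (lst : List String) (color : String) : Bool :=
  let opp : Option String :=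
    if color = "r" then some "b"
    else if color = "b" then some "r"
    else none
  list_check_loop lst opp color

-- ===== PRECONDITION & SPEC =====
def Spec_list_check (lst : List String) (color : String) (out : Bool) : Prop := out = list_check_alt lst color
instance (lst : List String) (color : String) (out : Bool) : Decidable (Spec_list_check lst color out) := by unfold Spec_list_check; infer_instance

-- ===== CLAIM (what is proved, stated in full; the proofs are below) =====
def Claim_equal_list_check : Prop := ∀ (lst : List String) (color : String), Dom_list_check lst color → Spec_list_check lst color (list_check lst color)

-- ===== LEMMAS AND PROOFS =====
theorem list_check_eq_loop (lst : List String) (color : String) :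
    list_check lst color = list_check_loop lst (opposite_of color) color := by
  induction lst with
  | nil => rfl
  | cons h t ih =>
    simp only [list_check, list_check_loop]
    by_cases hc : some h = opposite_of color
    · simp [hc, ih]
    · simp [hc]
      by_cases hcol : h = color <;> simp [hcol]

-- ===== VERDICT (by name: the statement is the Claim_ definition above) =====
theorem list_check_spec : Claim_equal_list_check := by
  intro lst color _
  unfold Spec_list_check list_check_alt
  simpa [opposite_of] using list_check_eq_loop lst color
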